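-- pv_equiv track=rewrite | github.com/Shyatt92/nessus-plugin-api-cli | fetch_matched_nessus_plugin.py | collect_attr_values
-- ===== SOURCE A (Python) =====
-- from typing import Any, Dict, List, Optional
--
-- def collect_attr_values(plugin_obj: Dict[str, Any]) -> Dict[str, List[str]]:
--     attr_values: Dict[str, List[str]] = {}
--     if "attributes" in plugin_obj and isinstance(plugin_obj["attributes"], list):
--         for a in plugin_obj["attributes"]:
--             if not isinstance(a, dict):
--                 continue
--             k = a.get("attribute_name")
--             v = a.get("attribute_value")
--             if not k:
--                 continue
--             attr_values.setdefault(k, [])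
--             if v is not None and str(v) != "":
--                 val = str(v)
--                 if val not in attr_values[k]:
--                     attr_values[k].append(val)
--     return attr_values
-- ===== SOURCE B (Python) =====
-- from typing import Any, Dict, List
--
--
-- def collect_attr_values(plugin_obj: Dict[str, Any]) -> Dict[str, List[str]]:
--     # Key-major: flatten to (name, value) pairs once, then build each key's
--     # deduped value list by a comprehension over the flat pairs.
--     attrs = plugin_obj.get("attributes")
--     if not isinstance(attrs, list):
--         return {}
--     pairs = [(a.get("attribute_name"), a.get("attribute_value"))
--              for a in attrs if isinstance(a, dict)]
--     pairs = [(k, v) for k, v in pairs if k]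
--     keys = list(dict.fromkeys(k for k, _ in pairs))
--     return {k: list(dict.fromkeys(str(v) for kk, v in pairs
--                                   if kk == k and v is not None and str(v) != ""))
--             for k in keys}
-- ===== Notes on version B (the rewrite author's own statement) =====
-- stated objective: alternative
-- what changed: A builds the result with one entry-major fold over the attributes, mutating a dict with setdefault and an inline membership test; B instead flattens the attributes once into a filtered (name,value) pair list, extracts the first-occurrence-ordered key list, and builds each key's deduped value list by a separate comprehension over the flat pairs (key-major staged passes).
import Mathlib
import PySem

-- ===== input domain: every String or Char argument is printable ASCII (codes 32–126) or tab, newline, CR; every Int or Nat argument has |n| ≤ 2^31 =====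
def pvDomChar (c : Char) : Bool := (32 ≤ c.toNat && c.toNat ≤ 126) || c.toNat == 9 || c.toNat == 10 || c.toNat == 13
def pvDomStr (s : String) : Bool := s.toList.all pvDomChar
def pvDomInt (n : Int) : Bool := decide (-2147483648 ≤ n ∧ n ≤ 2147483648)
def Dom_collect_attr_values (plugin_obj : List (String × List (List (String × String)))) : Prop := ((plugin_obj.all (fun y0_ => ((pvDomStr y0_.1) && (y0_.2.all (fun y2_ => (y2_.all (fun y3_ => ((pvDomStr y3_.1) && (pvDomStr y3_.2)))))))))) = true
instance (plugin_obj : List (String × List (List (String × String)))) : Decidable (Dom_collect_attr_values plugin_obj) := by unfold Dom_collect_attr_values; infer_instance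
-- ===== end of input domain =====

-- B replaces A's entry-major dict-mutating fold by key-major staged passes: flatten to filtered (name,value) pairs, dedup the key list, then build each key's deduped value list by a scan over the pairs (objective: alternative).


-- ===== PORT A =====
-- one iteration of A's for-loop (the 'isinstance(a, dict)' guard is always true in this model)
def pvStepA (d : PySem.Dict String (List String)) (a : List (String × String)) : PySem.Dict String (List String) :=
  match (PySem.Dict.mk a).get? "attribute_name" with
  | none => d
  | some k =>
    if k = "" then d
    else
      let d1 := d.setdefault k []
      match (PySem.Dict.mk a).get? "attribute_value" with
      | none => d1
      | some v =>
        if v = "" then d1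
        else if v ∈ d1.getD k [] then d1
        else d1.modify k [] (fun l => l ++ [v])

def collect_attr_values (plugin_obj : List (String × List (List (String × String)))) : List (String × List String) :=
  match (PySem.Dict.mk plugin_obj).get? "attributes" with
  | none => []
  | some attrs => (attrs.foldl pvStepA PySem.Dict.empty).items


-- ===== PORT B =====
-- B's two list comprehensions over attrs: (name,value) pairs, then the truthy-name filter
def pvPairs (attrs : List (List (String × String))) : List (String × Option String) :=
  ((attrs.map (fun a => ((PySem.Dict.mk a).get? "attribute_name",
                         (PySem.Dict.mk a).get? "attribute_value"))).filterMap
    (fun p => match p.1 with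
      | some k => if k = "" then none else some (k, p.2)
      | none => none))

-- B's inner generator: the non-empty values recorded for key k, in order
def pvVals (pairs : List (String × Option String)) (k : String) : List String :=
  pairs.filterMap (fun p =>
    if p.1 = k then
      match p.2 with
      | some v => if v = "" then none else some v
      | none => none
    else none)

def collect_attr_values_alt (plugin_obj : List (String × List (List (String × String)))) : List (String × List String) :=
  match (PySem.Dict.mk plugin_obj).get? "attributes" with
  | none => []
  | some attrs =>
    let pairs := pvPairs attrs
    let keys := PySem.List.dedup (pairs.map Prod.fst)
    keys.map (fun k => (k, PySem.List.dedup (pvVals pairs k)))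


-- ===== PRECONDITION & SPEC =====
def Spec_collect_attr_values (plugin_obj : List (String × List (List (String × String)))) (out : List (String × List String)) : Prop := out = collect_attr_values_alt plugin_obj
instance (plugin_obj : List (String × List (List (String × String)))) (out : List (String × List String)) : Decidable (Spec_collect_attr_values plugin_obj out) := by unfold Spec_collect_attr_values; infer_instance

-- ===== CLAIM (what is proved, stated in full; the proofs are below) =====
def Claim_equal_collect_attr_values : Prop := ∀ (plugin_obj : List (String × List (List (String × String)))), Dom_collect_attr_values plugin_obj → Spec_collect_attr_values plugin_obj (collect_attr_values plugin_obj)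

-- ===== LEMMAS AND PROOFS =====

-- the (key, value-option) one attribute contributes to pvPairs, if any
def pvKV (a : List (String × String)) : Option (String × Option String) :=
  match (PySem.Dict.mk a).get? "attribute_name" with
  | some k => if k = "" then none else some (k, (PySem.Dict.mk a).get? "attribute_value")
  | none => none

lemma pvPairs_append_one (attrs : List (List (String × String))) (a : List (String × String)) :
    pvPairs (attrs ++ [a]) = pvPairs attrs ++ (pvKV a).toList := by
  simp only [pvPairs, pvKV, List.map_append, List.filterMap_append, List.map_cons, List.map_nil,
    List.filterMap_cons, List.filterMap_nil]
  cases (PySem.Dict.mk a).get? "attribute_name" with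
  | none => rfl
  | some k => by_cases h : k = "" <;> simp [h]

lemma pvVals_append (p q : List (String × Option String)) (k : String) :
    pvVals (p ++ q) k = pvVals p k ++ pvVals q k := by
  simp [pvVals]

lemma pvVals_nil_of_not_mem (pairs : List (String × Option String)) (k : String)
    (h : k ∉ pairs.map Prod.fst) : pvVals pairs k = [] := by
  induction pairs with
  | nil => rfl
  | cons p t ih =>
    simp only [List.map_cons, List.mem_cons, not_or] at h
    simp only [pvVals, List.filterMap_cons]
    have hne : ¬ p.1 = k := fun hh => h.1 hh.symm
    simpa [hne, pvVals] using ih h.2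

lemma pvDedup_append (vs : List String) (v : String) :
    PySem.List.dedup (vs ++ [v])
      = if v ∈ vs then PySem.List.dedup vs else PySem.List.dedup vs ++ [v] := by
  have h := PySem.Set.ofList_append vs [v]
  simp only [PySem.List.dedup] at *
  rw [h]
  have : (PySem.Set.ofList vs).update [v] = (PySem.Set.ofList vs).add v := rfl
  rw [this, PySem.Set.add]
  by_cases hv : v ∈ vs
  · have : v ∈ PySem.Set.ofList vs := (PySem.Set.mem_ofList vs v).mpr hv
    simp [hv, this]
  · have : v ∉ PySem.Set.ofList vs := fun h => hv ((PySem.Set.mem_ofList vs v).mp h)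
    simp [hv, this]

-- canonical-dict lemmas: the dict whose items are keys.map (fun k => (k, V k))
lemma pvAny_canon (keys : List String) (V : String → List String) (k : String) :
    (keys.map (fun k' => (k', V k'))).any (fun p => p.1 == k) = decide (k ∈ keys) := by
  induction keys with
  | nil => rfl
  | cons q t ih =>
    simp only [List.map_cons, List.any_cons, ih, List.mem_cons]
    by_cases h : q = k
    · subst h; simp
    · have h2 : ¬ k = q := fun hh => h hh.symm
      simp [h, h2]

lemma pvGet?_canon (keys : List String) (V : String → List String) (k : String) :
    (PySem.Dict.mk (keys.map (fun k' => (k', V k')))).get? k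
      = if k ∈ keys then some (V k) else none := by
  induction keys with
  | nil => rfl
  | cons q t ih =>
    simp only [List.map_cons, PySem.Dict.get?_mk_cons]
    by_cases h : q = k
    · simp [h]
    · have : ¬ k = q := fun hh => h hh.symm
      simp [h, this, ih, List.mem_cons]

lemma pvContains_canon (keys : List String) (V : String → List String) (k : String) :
    (PySem.Dict.mk (keys.map (fun k' => (k', V k')))).contains k = decide (k ∈ keys) := by
  simpa [PySem.Dict.contains] using pvAny_canon keys V k

lemma pvInsert_canon (keys : List String) (V : String → List String) (k : String)
    (w : List String) (hk : k ∈ keys) :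
    (PySem.Dict.mk (keys.map (fun k' => (k', V k')))).insert k w
      = PySem.Dict.mk (keys.map (fun k' => (k', if k' = k then w else V k'))) := by
  unfold PySem.Dict.insert
  rw [pvContains_canon]
  simp only [hk, decide_true, if_true, List.map_map]
  apply congrArg
  apply List.map_congr_left
  intro k' _
  by_cases h : k' = k <;> simp [h]

lemma pvSetdefault_canon (keys : List String) (V : String → List String) (k : String)
    (hV : k ∉ keys → V k = []) :
    (PySem.Dict.mk (keys.map (fun k' => (k', V k')))).setdefault k []
      = PySem.Dict.mk ((if k ∈ keys then keys else keys ++ [k]).map (fun k' => (k', V k'))) := by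
  unfold PySem.Dict.setdefault
  rw [pvContains_canon]
  by_cases h : k ∈ keys
  · simp [h]
  · simp [h, hV h]

-- one A-step preserves the canonical form, mirroring what the pairs list gains
lemma pvStep_canon (attrs : List (List (String × String))) (a : List (String × String)) :
    pvStepA (PySem.Dict.mk ((PySem.List.dedup ((pvPairs attrs).map Prod.fst)).map
        (fun k => (k, PySem.List.dedup (pvVals (pvPairs attrs) k))) )) a
      = PySem.Dict.mk ((PySem.List.dedup ((pvPairs (attrs ++ [a])).map Prod.fst)).map
        (fun k => (k, PySem.List.dedup (pvVals (pvPairs (attrs ++ [a])) k)))) := by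
  rw [pvPairs_append_one]
  generalize pvPairs attrs = pairs
  unfold pvStepA pvKV
  cases hk : (PySem.Dict.mk a).get? "attribute_name" with
  | none => simp
  | some k =>
    by_cases hke : k = ""
    · simp [hke]
    · simp only [hke, if_false, Option.toList_some]
      set vo := (PySem.Dict.mk a).get? "attribute_value" with hvo
      set keys := PySem.List.dedup (pairs.map Prod.fst) with hkeys
      set V : String → List String := fun k => PySem.List.dedup (pvVals pairs k) with hVdef
      have hVnil : ∀ k, k ∉ keys → V k = [] := by
        intro k hk
        have hraw : k ∉ pairs.map Prod.fst := fun h =>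
          hk ((PySem.List.mem_dedup _ _).mpr h)
        simp [hVdef, pvVals_nil_of_not_mem pairs k hraw, PySem.List.dedup]
      have hmapfst : ((pairs ++ [(k, vo)]).map Prod.fst) = pairs.map Prod.fst ++ [k] := by
        simp
      have hkeys' : PySem.List.dedup ((pairs ++ [(k, vo)]).map Prod.fst)
          = if k ∈ keys then keys else keys ++ [k] := by
        rw [hmapfst, pvDedup_append]
        by_cases h : k ∈ pairs.map Prod.fst
        · have hm : k ∈ keys := (PySem.List.mem_dedup _ _).mpr h
          rw [if_pos h, if_pos hm]
        · have hm : k ∉ keys := fun hh => h ((PySem.List.mem_dedup _ _).mp hh)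
          rw [if_neg h, if_neg hm]
      set keys1 := if k ∈ keys then keys else keys ++ [k] with hk1
      have hkmem : k ∈ keys1 := by
        by_cases h : k ∈ keys <;> simp [hk1, h]
      have hsd : (PySem.Dict.mk (keys.map (fun k' => (k', V k')))).setdefault k []
          = PySem.Dict.mk (keys1.map (fun k' => (k', V k'))) := by
        rw [pvSetdefault_canon keys V k (hVnil k)]
      have hget1 : (PySem.Dict.mk (keys1.map (fun k' => (k', V k')))).getD k [] = V k := by
        simp [PySem.Dict.getD, pvGet?_canon, hkmem]
      have hVals' : ∀ k', pvVals (pairs ++ [(k, vo)]) k'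
          = pvVals pairs k' ++ pvVals [(k, vo)] k' := fun k' => pvVals_append _ _ k'
      rw [hkeys']
      cases hv : vo with
      | none =>
        dsimp only
        have hVsame : ∀ k', PySem.List.dedup (pvVals (pairs ++ [(k, none)]) k') = V k' := by
          intro k'
          have := hVals' k'
          rw [hv] at this
          rw [this]
          by_cases h : k = k' <;> simp [pvVals, h, hVdef]
        rw [hsd]
        exact congrArg PySem.Dict.mk
          (List.map_congr_left (fun k' _ => by rw [hVsame k'])).symm
      | some v =>
        dsimp only
        by_cases hve : v = ""
        · subst hve
          have hVsame : ∀ k', PySem.List.dedup (pvVals (pairs ++ [(k, some "")]) k') = V k' := by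
            intro k'
            have := hVals' k'
            rw [hv] at this
            rw [this]
            by_cases h : k = k' <;> simp [pvVals, h, hVdef]
          rw [if_pos rfl, hsd]
          exact congrArg PySem.Dict.mk
            (List.map_congr_left (fun k' _ => by rw [hVsame k'])).symm
        · simp only [hve, if_false]
          rw [hsd, hget1]
          have hVother : ∀ k', k' ≠ k →
              PySem.List.dedup (pvVals (pairs ++ [(k, some v)]) k') = V k' := by
            intro k' h
            have := hVals' k'
            rw [hv] at this
            rw [this]
            have h2 : ¬ k = k' := fun hh => h hh.symm
            simp [pvVals, h2, hVdef]
          have hone : pvVals [((k : String), some v)] k = [v] := by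
            simp [pvVals, hve]
          have hVk : PySem.List.dedup (pvVals (pairs ++ [(k, some v)]) k)
              = if v ∈ pvVals pairs k then V k else V k ++ [v] := by
            have := hVals' k
            rw [hv] at this
            rw [this, hone, pvDedup_append]
          by_cases hvin : v ∈ V k
          · have hvraw : v ∈ pvVals pairs k := by
              have : v ∈ PySem.List.dedup (pvVals pairs k) := hvin
              exact (PySem.List.mem_dedup _ _).mp this
            simp only [hvin, if_true]
            refine congrArg PySem.Dict.mk
              (List.map_congr_left (fun k' _ => ?_)).symm
            by_cases h : k' = k
            · subst h; rw [hVk]; simp [hvraw]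
            · rw [hVother k' h]
          · have hvraw : v ∉ pvVals pairs k := fun h => hvin ((PySem.List.mem_dedup _ _).mpr h)
            simp only [hvin, if_false]
            unfold PySem.Dict.modify
            simp only [hget1]
            rw [pvInsert_canon keys1 V k (V k ++ [v]) hkmem]
            refine congrArg PySem.Dict.mk
              (List.map_congr_left (fun k' _ => ?_)).symm
            by_cases h : k' = k
            · subst h; rw [hVk]; simp [hvraw]
            · rw [hVother k' h]; simp [h]

lemma pvFold_canon (attrs : List (List (String × String))) :
    (attrs.foldl pvStepA PySem.Dict.empty).items
      = (PySem.List.dedup ((pvPairs attrs).map Prod.fst)).map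
          (fun k => (k, PySem.List.dedup (pvVals (pvPairs attrs) k))) := by
  induction attrs using List.reverseRecOn with
  | nil => rfl
  | append_singleton t a ih =>
    rw [List.foldl_append, List.foldl_cons, List.foldl_nil]
    have hd : t.foldl pvStepA PySem.Dict.empty
        = PySem.Dict.mk ((PySem.List.dedup ((pvPairs t).map Prod.fst)).map
            (fun k => (k, PySem.List.dedup (pvVals (pvPairs t) k)))) := by
      rw [← ih]
    rw [hd, pvStep_canon]

-- ===== VERDICT (by name: the statement is the Claim_ definition above) =====
theorem collect_attr_values_spec : Claim_equal_collect_attr_values := by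
  intro plugin_obj _
  unfold Spec_collect_attr_values collect_attr_values collect_attr_values_alt
  cases h : (PySem.Dict.mk plugin_obj).get? "attributes" with
  | none => rfl
  | some attrs => exact pvFold_canon attrs
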